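-- pv_equiv track=rewrite | github.com/tm-Quan745/AI-8Puzzle-Project | utils/validators.py | is_valid_puzzle
-- ===== SOURCE A (Python) =====
-- def is_valid_puzzle(state):
--     """Kiểm tra tính hợp lệ của trạng thái puzzle"""
--     if not state or len(state) != 3:
--         return False
--
--     numbers = set()
--     for row in state:
--         if len(row) != 3:
--             return False
--         for num in row:
--             if not isinstance(num, int) or num < 0 or num > 8:
--                 return False
--             if num in numbers:
--                 return False
--             numbers.add(num)
--
--     return len(numbers) == 9
-- ===== SOURCE B (Python) =====
-- def is_valid_puzzle(state):
--     """Kiểm tra tính hợp lệ của trạng thái puzzle"""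
--     if not state or len(state) != 3:
--         return False
--     flat = []
--     for row in state:
--         if len(row) != 3:
--             return False
--         flat.extend(row)
--     if not all(isinstance(n, int) and 0 <= n <= 8 for n in flat):
--         return False
--     return sorted(flat) == list(range(9))
-- ===== Notes on version B (the rewrite author's own statement) =====
-- stated objective: simpler
-- what changed: Replaces the running-set membership test with early exit per cell by collecting all cells into a flat list and checking it once with an aggregate sorted(flat) == list(range(9)) comparison.
import Mathlib
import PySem

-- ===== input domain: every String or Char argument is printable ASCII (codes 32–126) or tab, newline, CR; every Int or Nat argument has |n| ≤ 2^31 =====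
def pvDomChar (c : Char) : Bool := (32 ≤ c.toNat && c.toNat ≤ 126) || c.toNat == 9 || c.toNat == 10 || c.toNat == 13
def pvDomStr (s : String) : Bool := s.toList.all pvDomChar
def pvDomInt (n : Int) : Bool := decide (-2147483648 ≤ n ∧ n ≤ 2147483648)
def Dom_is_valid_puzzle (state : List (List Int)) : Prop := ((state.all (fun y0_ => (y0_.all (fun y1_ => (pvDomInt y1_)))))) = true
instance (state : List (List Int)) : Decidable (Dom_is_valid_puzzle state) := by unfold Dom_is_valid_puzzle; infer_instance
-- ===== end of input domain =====

-- B replaces A's running-set membership/early-exit distinctness check by collecting all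
-- cells into a flat list and testing it once with sorted(flat) == list(range(9)) (simpler).


-- ===== PORT A =====
-- inner 'for num in row' loop: none = early 'return False'
def pvCellLoopA (row : List Int) (numbers : PySem.Set Int) : Option (PySem.Set Int) :=
  match row with
  | [] => some numbers
  | num :: rest =>
    if num < 0 || num > 8 then none
    else if PySem.Set.contains numbers num then none
    else pvCellLoopA rest (PySem.Set.add numbers num)

-- outer 'for row in state' loop, then 'return len(numbers) == 9'
def pvRowLoopA (rows : List (List Int)) (numbers : PySem.Set Int) : Bool :=
  match rows with
  | [] => PySem.Set.len numbers == 9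
  | row :: rest =>
    if row.length ≠ 3 then false
    else
      match pvCellLoopA row numbers with
      | none => false
      | some numbers' => pvRowLoopA rest numbers'

def is_valid_puzzle (state : List (List Int)) : Bool :=
  if state.isEmpty || state.length ≠ 3 then false
  else pvRowLoopA state PySem.Set.empty

-- ===== PORT B =====
-- 'for row in state: check len, flat.extend(row)'; none = early 'return False'
def pvCollectB (rows : List (List Int)) (flat : List Int) : Option (List Int) :=
  match rows with
  | [] => some flat
  | row :: rest => if row.length ≠ 3 then none else pvCollectB rest (flat ++ row)

def is_valid_puzzle_alt (state : List (List Int)) : Bool :=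
  if state.isEmpty || state.length ≠ 3 then false
  else
    match pvCollectB state [] with
    | none => false
    | some flat =>
      if !(flat.all fun n => decide (0 ≤ n) && decide (n ≤ 8)) then false
      else PySem.List.sorted flat (fun x => x) false == PySem.List.pyRange 0 9 1

-- ===== PRECONDITION & SPEC =====
def Spec_is_valid_puzzle (state : List (List Int)) (out : Bool) : Prop := out = is_valid_puzzle_alt state
instance (state : List (List Int)) (out : Bool) : Decidable (Spec_is_valid_puzzle state out) := by unfold Spec_is_valid_puzzle; infer_instance

-- ===== CLAIM (what is proved, stated in full; the proofs are below) =====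
def Claim_equal_is_valid_puzzle : Prop := ∀ (state : List (List Int)), Dom_is_valid_puzzle state → Spec_is_valid_puzzle state (is_valid_puzzle state)

-- ===== LEMMAS AND PROOFS =====

theorem cellLoopA_eq (row : List Int) (s : PySem.Set Int) (hs : s.Nodup) :
    pvCellLoopA row s =
      if (∀ n ∈ row, 0 ≤ n ∧ n ≤ 8) ∧ (s ++ row).Nodup then some (s ++ row) else none := by
  induction row generalizing s with
  | nil => simp [pvCellLoopA, hs]
  | cons n rest ih =>
    by_cases hrange : n < 0 || n > 8
    · rw [pvCellLoopA]
      rw [if_pos hrange, if_neg]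
      rintro ⟨hall, -⟩
      have := hall n (by simp)
      simp only [Bool.or_eq_true, decide_eq_true_eq] at hrange
      omega
    · by_cases hmem : n ∈ s
      · rw [pvCellLoopA, if_neg hrange, if_pos (by simpa [PySem.Set.contains_iff] using hmem), if_neg]
        rintro ⟨-, hnd⟩
        exact (List.nodup_append.mp hnd).2.2 n hmem n (by simp) rfl
      · rw [pvCellLoopA, if_neg hrange,
          if_neg (by simpa [PySem.Set.contains_iff] using hmem),
          PySem.Set.add_of_not_mem hmem,
          ih (s ++ [n]) (by
            rw [List.nodup_append]
            exact ⟨hs, by simp, fun a ha b hb => by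
              simp only [List.mem_singleton] at hb
              subst hb
              exact fun h => hmem (h ▸ ha)⟩)]
        simp only [Bool.or_eq_true, decide_eq_true_eq, not_or, not_lt] at hrange
        have hassoc : (s ++ [n]) ++ rest = s ++ n :: rest := by simp
        rw [hassoc]
        refine if_congr ?_ rfl rfl
        constructor
        · rintro ⟨h1, h2⟩
          refine ⟨fun m hm => ?_, h2⟩
          rcases List.mem_cons.mp hm with rfl | hm'
          · omega
          · exact h1 m hm'
        · rintro ⟨h1, h2⟩
          exact ⟨fun m hm => h1 m (List.mem_cons_of_mem _ hm), h2⟩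

theorem rowLoopA_eq (rows : List (List Int)) (s : PySem.Set Int) (hs : s.Nodup) :
    pvRowLoopA rows s =
      decide ((∀ r ∈ rows, r.length = 3) ∧ (∀ n ∈ rows.flatten, 0 ≤ n ∧ n ≤ 8) ∧
        (s ++ rows.flatten).Nodup ∧ (s ++ rows.flatten).length = 9) := by
  induction rows generalizing s with
  | nil =>
    simp only [pvRowLoopA, List.flatten_nil, List.append_nil]
    rw [Bool.eq_iff_iff]
    simp [PySem.Set.len, hs]
    omega
  | cons row rest ih =>
    rw [pvRowLoopA]
    by_cases hlen : row.length ≠ 3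
    · rw [if_pos (by simpa using hlen)]
      symm
      simp only [decide_eq_false_iff_not]
      rintro ⟨h1, -⟩
      exact hlen (h1 row (by simp))
    · push Not at hlen
      rw [if_neg (by simp [hlen]), cellLoopA_eq row s hs]
      by_cases hc : (∀ n ∈ row, 0 ≤ n ∧ n ≤ 8) ∧ (s ++ row).Nodup
      · rw [if_pos hc]
        show pvRowLoopA rest (s ++ row) = _
        rw [ih (s ++ row) hc.2]
        simp only [List.flatten_cons, ← List.append_assoc]
        congr 1
        simp only [eq_iff_iff, List.mem_cons, List.mem_append]
        constructor
        · rintro ⟨h1, h2, h3, h4⟩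
          refine ⟨?_, ?_, h3, h4⟩
          · intro r hr
            rcases hr with rfl | hr
            · exact hlen
            · exact h1 r hr
          · intro n hn
            rcases hn with hn | hn
            · exact hc.1 n hn
            · exact h2 n hn
        · rintro ⟨h1, h2, h3, h4⟩
          exact ⟨fun r hr => h1 r (Or.inr hr), fun n hn => h2 n (Or.inr hn), h3, h4⟩
      · rw [if_neg hc]
        symm
        simp only [decide_eq_false_iff_not]
        rintro ⟨h1, h2, h3, -⟩
        refine hc ⟨fun n hn => h2 n (by simp [hn]), ?_⟩
        have hsub : (s ++ row).Sublist (s ++ (row :: rest).flatten) := by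
          simp only [List.flatten_cons, ← List.append_assoc]
          exact List.sublist_append_left _ _
        exact h3.sublist hsub
    
theorem collectB_eq (rows : List (List Int)) (flat : List Int) :
    pvCollectB rows flat =
      if ∀ r ∈ rows, r.length = 3 then some (flat ++ rows.flatten) else none := by
  induction rows generalizing flat with
  | nil => simp [pvCollectB]
  | cons row rest ih =>
    rw [pvCollectB]
    by_cases hlen : row.length ≠ 3
    · rw [if_pos (by simpa using hlen), if_neg]
      rintro h
      exact hlen (h row (by simp))
    · push Not at hlen
      rw [if_neg (by simp [hlen]), ih]
      by_cases hr : ∀ r ∈ rest, r.length = 3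
      · rw [if_pos hr, if_pos (by simpa [hlen] using hr)]
        simp
      · rw [if_neg hr, if_neg (by rintro h; exact hr fun r hrm => h r (by simp [hrm]))]

-- the target list sorted(0..8) as used by B
theorem pyRange09 : PySem.List.pyRange 0 9 1 = [0, 1, 2, 3, 4, 5, 6, 7, 8] := by decide

theorem perm_iff_nodup (flat : List Int) (hlen : flat.length = 9) :
    ((∀ n ∈ flat, 0 ≤ n ∧ n ≤ 8) ∧ flat.Nodup) ↔
      flat.Perm [0, 1, 2, 3, 4, 5, 6, 7, 8] := by
  constructor
  · rintro ⟨hrange, hnd⟩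
    have hsub : flat ⊆ [0, 1, 2, 3, 4, 5, 6, 7, 8] := by
      intro n hn
      have := hrange n hn
      have h9 : n = 0 ∨ n = 1 ∨ n = 2 ∨ n = 3 ∨ n = 4 ∨ n = 5 ∨ n = 6 ∨ n = 7 ∨ n = 8 := by omega
      simp only [List.mem_cons, List.not_mem_nil, or_false]
      tauto
    have hsp : flat.Subperm [0, 1, 2, 3, 4, 5, 6, 7, 8] := hnd.subperm hsub
    exact hsp.perm_of_length_le (by simp [hlen])
  · intro hp
    refine ⟨fun n hn => ?_, hp.nodup_iff.mpr (by decide)⟩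
    have := hp.mem_iff.mp hn
    simp only [List.mem_cons, List.not_mem_nil, or_false] at this
    rcases this with rfl | rfl | rfl | rfl | rfl | rfl | rfl | rfl | rfl <;> omega

theorem sorted_eq_iff_perm (flat : List Int) :
    PySem.List.sorted flat (fun x => x) false = [0, 1, 2, 3, 4, 5, 6, 7, 8] ↔
      flat.Perm [0, 1, 2, 3, 4, 5, 6, 7, 8] := by
  constructor
  · intro h
    have := PySem.List.sorted_perm (xs := flat) (key := fun x => x) (rev := false)
    rw [h] at this
    exact this.symm
  · intro hp
    exact PySem.List.sorted_eq_of_perm_of_pairwise_lt flat [0, 1, 2, 3, 4, 5, 6, 7, 8]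
      (fun x => x) hp.symm (by decide)

-- ===== VERDICT (by name: the statement is the Claim_ definition above) =====
theorem is_valid_puzzle_spec : Claim_equal_is_valid_puzzle := by
  intro state _
  unfold Spec_is_valid_puzzle is_valid_puzzle is_valid_puzzle_alt
  by_cases hguard : state.isEmpty || state.length ≠ 3
  · rw [if_pos hguard, if_pos hguard]
  · rw [if_neg hguard, if_neg hguard]
    have hslen : state.length = 3 := by
      simp only [Bool.or_eq_true, decide_eq_true_eq, not_or] at hguard
      simpa using hguard.2
    rw [rowLoopA_eq state PySem.Set.empty (by simp [PySem.Set.empty]), collectB_eq]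
    by_cases hrows : ∀ r ∈ state, r.length = 3
    · rw [if_pos hrows]
      have hflen : state.flatten.length = 9 := by
        obtain ⟨a, b, c, rfl⟩ := List.length_eq_three.mp hslen
        have ha := hrows a (by simp)
        have hb := hrows b (by simp)
        have hc := hrows c (by simp)
        simp [ha, hb, hc]
      simp only [List.nil_append]
      set flat := state.flatten with hflat
      by_cases hrange : ∀ n ∈ flat, 0 ≤ n ∧ n ≤ 8
      · have hall : (flat.all fun n => decide (0 ≤ n) && decide (n ≤ 8)) = true := by
          simp only [List.all_eq_true, Bool.and_eq_true, decide_eq_true_eq]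
          exact fun n hn => hrange n hn
        rw [hall]
        simp only [Bool.not_true, Bool.false_eq_true, if_false]
        rw [pyRange09]
        by_cases hnd : flat.Nodup
        · have hperm := (perm_iff_nodup flat hflen).mp ⟨hrange, hnd⟩
          rw [decide_eq_true (by exact ⟨hrows, hrange, hnd, hflen⟩)]
          symm
          simpa [sorted_eq_iff_perm] using hperm
        · rw [decide_eq_false (by rintro ⟨-, -, h, -⟩; exact hnd h)]
          symm
          simp only [beq_eq_false_iff_ne, ne_eq]
          intro h
          exact hnd ((perm_iff_nodup flat hflen).mpr ((sorted_eq_iff_perm flat).mp h)).2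
      · have hall : (flat.all fun n => decide (0 ≤ n) && decide (n ≤ 8)) = false := by
          simp only [List.all_eq_false]
          push Not at hrange
          obtain ⟨n, hn, h⟩ := hrange
          exact ⟨n, hn, by simpa [Decidable.not_and_iff_or_not] using h⟩
        rw [hall]
        simp only [Bool.not_false, if_true]
        rw [decide_eq_false]
        rintro ⟨-, h, -⟩
        exact absurd h hrange
    · rw [if_neg hrows, decide_eq_false (by rintro ⟨h, -⟩; exact hrows h)]
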